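-- pv_equiv track=rewrite | github.com/amole-arup/eng_utilities | eng_utilities/GWA_utilities.py | set_releases
-- ===== SOURCE A (Python) =====
-- def set_releases(rel, n=1):
--     if rel == 'PINNED':
--         rel_1 = 'FFFRRR'
--         rel_2 = 'FFFFRR'
--         if n == 1:
--             return ['FFFRRR\tFFFFRR']
--     else:
--         rels = rel.split()
--         rel_1 = ''.join(['R' if r in rels else 'F' for r in ('PI', 'V2I', 'V3I', 'TI', 'M2I', 'M3I')])
--         rel_2 = ''.join(['R' if r in rels else 'F' for r in ('PJ', 'V2J', 'V3J', 'TJ', 'M2J', 'M3J')])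
--     if n == 1:
--         return ['\t'.join([rel_1, rel_2])]
--     else:
--         rels_list = [rel_1] + (n-1)*2*['FFFFFF'] + [rel_2]
--         return ['\t'.join([r1, r2]) for r1, r2 in zip(rels_list[::2], rels_list[1::2])]
-- ===== SOURCE B (Python) =====
-- def set_releases(rel, n=1):
--     if rel == 'PINNED':
--         rel_1, rel_2 = 'FFFRRR', 'FFFFRR'
--     else:
--         rels = rel.split()
--         rel_1 = ''.join('R' if r in rels else 'F' for r in ('PI', 'V2I', 'V3I', 'TI', 'M2I', 'M3I'))
--         rel_2 = ''.join('R' if r in rels else 'F' for r in ('PJ', 'V2J', 'V3J', 'TJ', 'M2J', 'M3J'))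
--     m = max(1, n)
--     return [(rel_1 if i == 0 else 'FFFFFF') + '\t' + (rel_2 if i == m - 1 else 'FFFFFF')
--             for i in range(m)]
-- ===== Notes on version B (the rewrite author's own statement) =====
-- stated objective: simpler
-- what changed: B replaces A's flat-list + [::2]/[1::2] slicing + zip machinery and the two separate n==1 early returns with one list comprehension over range(max(1,n)) that emits each tab-joined row directly.
import Mathlib
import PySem

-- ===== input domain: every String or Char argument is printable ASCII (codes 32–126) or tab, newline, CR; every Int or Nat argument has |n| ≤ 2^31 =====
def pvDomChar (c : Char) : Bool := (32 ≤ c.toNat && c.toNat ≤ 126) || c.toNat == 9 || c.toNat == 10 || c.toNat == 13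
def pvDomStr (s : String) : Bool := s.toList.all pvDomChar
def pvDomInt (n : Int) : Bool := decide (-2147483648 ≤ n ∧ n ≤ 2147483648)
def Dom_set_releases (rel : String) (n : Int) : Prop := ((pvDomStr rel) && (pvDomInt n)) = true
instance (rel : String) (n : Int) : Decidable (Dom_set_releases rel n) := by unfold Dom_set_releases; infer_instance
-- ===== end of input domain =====

-- B replaces A's flat-list + [::2]/[1::2] slicing + zip machinery with one loop over
-- range(max(1,n)) emitting each row directly (objective: simpler); same return value everywhere.


-- ===== PORT A =====
-- the code of A after rel_1/rel_2 are set (shared fall-through tail of both branches)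
def set_releases_tail (rel_1 rel_2 : String) (n : Int) : List String :=
  if n = 1 then [PySem.Str.join "\t" [rel_1, rel_2]]
  else
    let rels_list := [rel_1] ++ PySem.List.pyRepeat ["FFFFFF"] ((n - 1) * 2) ++ [rel_2]
    -- xs[::2] and xs[1::2]: the step 2 is nonzero, so slice? is always `some`
    let evens := (PySem.List.slice? rels_list none none 2).getD []
    let odds := (PySem.List.slice? rels_list (some 1) none 2).getD []
    (evens.zip odds).map (fun p => PySem.Str.join "\t" [p.1, p.2])

def set_releases (rel : String) (n : Int) : List String :=
  if rel == "PINNED" then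
    if n = 1 then ["FFFRRR\tFFFFRR"]
    else set_releases_tail "FFFRRR" "FFFFRR" n
  else
    let rels := PySem.Str.split₀ rel
    let rel_1 := PySem.Str.join "" (["PI", "V2I", "V3I", "TI", "M2I", "M3I"].map
      (fun r => if rels.contains r then "R" else "F"))
    let rel_2 := PySem.Str.join "" (["PJ", "V2J", "V3J", "TJ", "M2J", "M3J"].map
      (fun r => if rels.contains r then "R" else "F"))
    set_releases_tail rel_1 rel_2 n

-- ===== PORT B =====
-- the list comprehension of Source B: one row per i in range(max(1, n));
-- Python string `+` is ported as PySem.Str.join "" [...]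
def set_releases_alt_rows (rel_1 rel_2 : String) (m : Int) : List String :=
  (PySem.List.pyRange 0 m 1).map (fun i =>
    PySem.Str.join "" [if i = 0 then rel_1 else "FFFFFF", "\t",
                       if i = m - 1 then rel_2 else "FFFFFF"])

def set_releases_alt (rel : String) (n : Int) : List String :=
  let pr :=
    if rel == "PINNED" then ("FFFRRR", "FFFFRR")
    else
      let rels := PySem.Str.split₀ rel
      (PySem.Str.join "" (["PI", "V2I", "V3I", "TI", "M2I", "M3I"].map
         (fun r => if rels.contains r then "R" else "F")),
       PySem.Str.join "" (["PJ", "V2J", "V3J", "TJ", "M2J", "M3J"].map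
         (fun r => if rels.contains r then "R" else "F")))
  set_releases_alt_rows pr.1 pr.2 (max 1 n)

-- ===== PRECONDITION & SPEC =====
def Spec_set_releases (rel : String) (n : Int) (out : List String) : Prop := out = set_releases_alt rel n
instance (rel : String) (n : Int) (out : List String) : Decidable (Spec_set_releases rel n out) := by unfold Spec_set_releases; infer_instance

-- ===== CLAIM (what is proved, stated in full; the proofs are below) =====
def Claim_equal_set_releases : Prop := ∀ (rel : String) (n : Int), Dom_set_releases rel n → Spec_set_releases rel n (set_releases rel n)

-- ===== LEMMAS AND PROOFS =====

-- one output row "a\tb"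
def rowJ (a b : String) : String := PySem.Str.join "\t" [a, b]

-- the common closed form of both tails, indexed by k = (n-1).toNat (row count k+1)
def rowsC (k : Nat) (r1 r2 : String) : List String :=
  match k with
  | 0 => [rowJ r1 r2]
  | Nat.succ m => rowJ r1 "FFFFFF" :: (List.replicate m (rowJ "FFFFFF" "FFFFFF") ++ [rowJ "FFFFFF" r2])

lemma join_empty_tab (a b : String) : PySem.Str.join "" [a, "\t", b] = rowJ a b := by
  have h1 : ("" : String).toList = [] := by decide
  have h2 : ("\t" : String).toList = ['\t'] := by decide
  simp [PySem.Str.join, rowJ, PySem.Chars.join, h1, h2, List.intercalate, List.intersperse]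

lemma slice2_single {α : Type} (a : α) : PySem.List.slice? [a] none none 2 = some [a] := by
  simp [PySem.List.slice?, PySem.List.sliceIndices]

lemma slice2_cons₂ {α : Type} (a b : α) (l : List α) :
    PySem.List.slice? (a :: b :: l) none none 2
      = (PySem.List.slice? l none none 2).map (a :: ·) := by
  simp only [PySem.List.slice?, PySem.List.sliceIndices, List.length_cons]
  norm_num
  have hc' : (if 0 < l.length then (((l.length : Int) + 2 - 1) / 2).toNat else 0)
      = (((l.length : Int) + 1) / 2).toNat := by
    split_ifs with h
    · omega
    · have h0 : l.length = 0 := by omega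
      simp [h0]
  have hc : ((((l.length : Int)) + 1 + 1 + 2 - 1) / 2).toNat
      = (((l.length : Int) + 1) / 2).toNat + 1 := by omega
  have hpos : (0 : Int) ≤ (l.length : Int) + 1 := by omega
  rw [hc', hc, if_pos hpos, List.range_succ_eq_map]
  simp only [List.filterMap_cons, List.filterMap_map]
  norm_num
  refine List.filterMap_congr ?_
  intro j hj
  have h0 : (2 * ((j.succ : Nat) : Int)).toNat = ((2 * (j : Int)).toNat + 1) + 1 := by
    omega
  show (a :: b :: l)[(2 * ((j.succ : Nat) : Int)).toNat]? = l[(2 * (j : Int)).toNat]?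
  rw [h0, List.getElem?_cons_succ, List.getElem?_cons_succ]

lemma slice2_from_one {α : Type} (a : α) (l : List α) :
    PySem.List.slice? (a :: l) (some 1) none 2 = PySem.List.slice? l none none 2 := by
  simp only [PySem.List.slice?, PySem.List.sliceIndices, List.length_cons]
  norm_num
  refine List.filterMap_congr ?_
  intro j hj
  have h0 : (1 + 2 * ((j : Nat) : Int)).toNat = (2 * (j : Int)).toNat + 1 := by omega
  rw [h0, List.getElem?_cons_succ]

lemma evens_eq (k : Nat) (x r2 : String) :
    PySem.List.slice? (x :: (List.replicate (2 * k) "FFFFFF" ++ [r2])) none none 2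
      = some (x :: List.replicate k "FFFFFF") := by
  induction k generalizing x with
  | zero => simpa using slice2_cons₂ x r2 ([] : List String)
  | succ m ih =>
      have hsh : (2 * (m + 1)) = (2 * m + 1) + 1 := by omega
      rw [hsh, List.replicate_succ, List.replicate_succ]
      rw [List.cons_append, List.cons_append, slice2_cons₂, ih "FFFFFF"]
      simp [List.replicate_succ]

lemma odds_core (k : Nat) (r2 : String) :
    PySem.List.slice? (List.replicate (2 * k) "FFFFFF" ++ [r2]) none none 2
      = some (List.replicate k "FFFFFF" ++ [r2]) := by
  induction k with
  | zero => simpa using slice2_single r2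
  | succ m ih =>
      have hsh : (2 * (m + 1)) = (2 * m + 1) + 1 := by omega
      rw [hsh, List.replicate_succ, List.replicate_succ]
      rw [List.cons_append, List.cons_append, slice2_cons₂, ih]
      simp [List.replicate_succ]

lemma odds_eq (k : Nat) (x r2 : String) :
    PySem.List.slice? (x :: (List.replicate (2 * k) "FFFFFF" ++ [r2])) (some 1) none 2
      = some (List.replicate k "FFFFFF" ++ [r2]) := by
  rw [slice2_from_one, odds_core]

lemma zip_aux (m : Nat) (r2 : String) :
    ("FFFFFF" :: List.replicate m "FFFFFF").zip (List.replicate m "FFFFFF" ++ [r2])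
      = List.replicate m ("FFFFFF", "FFFFFF") ++ [("FFFFFF", r2)] := by
  induction m with
  | zero => simp
  | succ p ih =>
      rw [List.replicate_succ, List.replicate_succ, List.cons_append, List.zip_cons_cons, ih]
      simp

lemma zip_rows (k : Nat) (r1 r2 : String) :
    ((r1 :: List.replicate k "FFFFFF").zip (List.replicate k "FFFFFF" ++ [r2])).map
        (fun p => PySem.Str.join "\t" [p.1, p.2]) = rowsC k r1 r2 := by
  cases k with
  | zero => simp [rowsC, rowJ]
  | succ m =>
      rw [List.replicate_succ, List.cons_append, List.zip_cons_cons, zip_aux m r2]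
      simp [rowsC, rowJ, List.map_replicate]

lemma alt_rows_eq (k : Nat) (r1 r2 : String) :
    set_releases_alt_rows r1 r2 ((k : Int) + 1) = rowsC k r1 r2 := by
  unfold set_releases_alt_rows
  rw [PySem.List.pyRange_one]
  have ht : (((k : Int) + 1) - 0).toNat = k + 1 := by omega
  rw [ht, List.map_map]
  have hfun : ∀ j ∈ List.range (k + 1),
      ((fun i : Int => PySem.Str.join "" [if i = 0 then r1 else "FFFFFF", "\t",
          if i = (k : Int) + 1 - 1 then r2 else "FFFFFF"]) ∘ (fun j : Nat => (0 : Int) + ↑j)) j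
        = rowJ (if j = 0 then r1 else "FFFFFF") (if j = k then r2 else "FFFFFF") := by
    intro j hj
    have e1 : ((0 : Int) + ↑j = 0) = (j = 0) := by
      apply propext; omega
    have e2 : ((0 : Int) + ↑j = (k : Int) + 1 - 1) = (j = k) := by
      apply propext; omega
    simp only [Function.comp, e1, e2, join_empty_tab]
  rw [List.map_congr_left hfun]
  cases k with
  | zero => simp [rowsC]
  | succ m =>
      rw [List.range_succ, List.map_append]
      have hfront : ∀ j ∈ List.range (m + 1),
          rowJ (if j = 0 then r1 else "FFFFFF") (if j = m + 1 then r2 else "FFFFFF")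
            = rowJ (if j = 0 then r1 else "FFFFFF") "FFFFFF" := by
        intro j hj
        have : j ≠ m + 1 := by simpa using Nat.ne_of_lt (List.mem_range.mp hj)
        simp [this]
      rw [List.map_congr_left hfront, List.range_succ_eq_map, List.map_cons, List.map_map]
      have hmid : ∀ j ∈ List.range m,
          ((fun a => rowJ (if a = 0 then r1 else "FFFFFF") "FFFFFF") ∘ Nat.succ) j
            = rowJ "FFFFFF" "FFFFFF" := by
        intro j _
        simp [Function.comp]
      rw [List.map_congr_left hmid]
      simp [rowsC]

lemma tail_eq (r1 r2 : String) (n : Int) :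
    set_releases_tail r1 r2 n = set_releases_alt_rows r1 r2 (max 1 n) := by
  by_cases h1 : n = 1
  · subst h1
    have hm : (max 1 (1 : Int)) = ((0 : Nat) : Int) + 1 := by norm_num
    rw [hm, alt_rows_eq]
    simp [set_releases_tail, rowsC, rowJ]
  · have hm : (max 1 n) = (((n - 1).toNat : Nat) : Int) + 1 := by omega
    rw [hm, alt_rows_eq]
    have h2 : ((n - 1) * 2).toNat = 2 * (n - 1).toNat := by omega
    simp only [set_releases_tail, if_neg h1, PySem.List.pyRepeat_singleton, h2,
      List.nil_append, List.cons_append]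
    rw [evens_eq, odds_eq]
    simpa using zip_rows (n - 1).toNat r1 r2

-- ===== VERDICT (by name: the statement is the Claim_ definition above) =====
theorem set_releases_spec : Claim_equal_set_releases := by
  intro rel n _
  unfold Spec_set_releases set_releases set_releases_alt
  cases hp : (rel == "PINNED") with
  | true =>
      simp only [if_true]
      by_cases h1 : n = 1
      · subst h1
        have hm : (max 1 (1 : Int)) = ((0 : Nat) : Int) + 1 := by norm_num
        simp only [hm, alt_rows_eq]
        decide
      · rw [if_neg h1, tail_eq]
  | false =>
      simp only [Bool.false_eq_true, if_false]
      exact tail_eq _ _ n
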